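-- pv_equiv track=rewrite | github.com/lanazhang/aws-ai-cm-rek-img-accuracy-eval-cdk | lambda/task/task-with-count/cm-accuracy-eval-job-get-job-with-s3-object-count.py | count_flags
-- ===== SOURCE A (Python) =====
-- def count_flags(items, labeled, reviewed, tp, tn, fp, fn):
--     labeled += len(items)
--     for i in items:
--         if i["reviewed_flag"]["N"] == "1":
--             reviewed += 1
--         if i["fp_flag"]["N"] == "1":
--             fp += 1
--         if i["fn_flag"]["N"] == "1":
--             fn += 1
--         if i["tp_flag"]["N"] == "1":
--             tp += 1
--         if i["tn_flag"]["N"] == "1":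
--             tn += 1
--     return labeled, reviewed, tp, tn, fp, fn
-- ===== SOURCE B (Python) =====
-- def count_flags(items, labeled, reviewed, tp, tn, fp, fn):
--     labeled += len(items)
--     reviewed += sum(1 for i in items if i["reviewed_flag"]["N"] == "1")
--     fp += sum(1 for i in items if i["fp_flag"]["N"] == "1")
--     fn += sum(1 for i in items if i["fn_flag"]["N"] == "1")
--     tp += sum(1 for i in items if i["tp_flag"]["N"] == "1")
--     tn += sum(1 for i in items if i["tn_flag"]["N"] == "1")
--     return labeled, reviewed, tp, tn, fp, fn
-- ===== Notes on version B (the rewrite author's own statement) =====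
-- stated objective: idiomatic
-- what changed: Replaces the single combined loop updating five counters with five independent generator-expression counting passes, one per flag.
import Mathlib
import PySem

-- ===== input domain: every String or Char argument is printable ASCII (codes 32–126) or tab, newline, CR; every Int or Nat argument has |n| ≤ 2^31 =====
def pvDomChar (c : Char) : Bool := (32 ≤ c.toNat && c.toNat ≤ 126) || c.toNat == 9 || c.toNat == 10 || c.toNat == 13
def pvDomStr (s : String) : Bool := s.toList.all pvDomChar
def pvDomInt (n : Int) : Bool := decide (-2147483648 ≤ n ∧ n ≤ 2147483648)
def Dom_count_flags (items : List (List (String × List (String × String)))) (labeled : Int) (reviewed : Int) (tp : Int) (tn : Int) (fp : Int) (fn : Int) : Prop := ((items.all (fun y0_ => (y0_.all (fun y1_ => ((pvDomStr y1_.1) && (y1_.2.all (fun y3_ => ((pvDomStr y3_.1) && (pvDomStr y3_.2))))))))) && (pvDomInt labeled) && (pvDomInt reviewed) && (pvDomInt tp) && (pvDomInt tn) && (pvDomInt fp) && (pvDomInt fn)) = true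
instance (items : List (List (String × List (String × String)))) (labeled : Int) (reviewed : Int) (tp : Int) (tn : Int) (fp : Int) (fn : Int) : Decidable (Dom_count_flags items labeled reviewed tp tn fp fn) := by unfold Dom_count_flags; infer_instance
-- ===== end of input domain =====

-- B replaces the single combined loop with five independent counting passes (idiomatic decomposition); same values.

-- ===== PORT A =====
-- i["k"]["N"] == "1", with missing keys defaulting (Pre_ excludes the KeyError inputs)
def pvFlag (i : List (String × List (String × String))) (k : String) : Bool :=
  PySem.Dict.getD (PySem.Dict.mk (PySem.Dict.getD (PySem.Dict.mk i) k [])) "N" "" == "1"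

-- the single for-loop of A, threading all five counters
def pvLoopA : List (List (String × List (String × String))) → Int → Int → Int → Int → Int → Int → Int × Int × Int × Int × Int × Int
  | [], labeled, reviewed, tp, tn, fp, fn => (labeled, reviewed, tp, tn, fp, fn)
  | i :: rest, labeled, reviewed, tp, tn, fp, fn =>
      pvLoopA rest labeled
        (if pvFlag i "reviewed_flag" then reviewed + 1 else reviewed)
        (if pvFlag i "tp_flag" then tp + 1 else tp)
        (if pvFlag i "tn_flag" then tn + 1 else tn)
        (if pvFlag i "fp_flag" then fp + 1 else fp)
        (if pvFlag i "fn_flag" then fn + 1 else fn)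

def count_flags (items : List (List (String × List (String × String)))) (labeled : Int) (reviewed : Int) (tp : Int) (tn : Int) (fp : Int) (fn : Int) : Int × Int × Int × Int × Int × Int :=
  pvLoopA items (labeled + items.length) reviewed tp tn fp fn

-- ===== PORT B =====
-- sum(1 for i in items if i[k]["N"] == "1")
def pvCount (items : List (List (String × List (String × String)))) (k : String) : Int :=
  (items.countP (fun i => pvFlag i k) : Nat)

def count_flags_alt (items : List (List (String × List (String × String)))) (labeled : Int) (reviewed : Int) (tp : Int) (tn : Int) (fp : Int) (fn : Int) : Int × Int × Int × Int × Int × Int :=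
  (labeled + items.length,
   reviewed + pvCount items "reviewed_flag",
   tp + pvCount items "tp_flag",
   tn + pvCount items "tn_flag",
   fp + pvCount items "fp_flag",
   fn + pvCount items "fn_flag")

-- ===== PRECONDITION & SPEC =====
-- Pre_ excludes inputs where some item lacks one of the five flag keys or its value lacks "N": Python A raises KeyError there.
def Pre_count_flags (items : List (List (String × List (String × String)))) (labeled : Int) (reviewed : Int) (tp : Int) (tn : Int) (fp : Int) (fn : Int) : Prop :=
  ∀ i ∈ items, ∀ k ∈ ["reviewed_flag", "fp_flag", "fn_flag", "tp_flag", "tn_flag"],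
    (((PySem.Dict.get? (PySem.Dict.mk i) k).bind (fun d => PySem.Dict.get? (PySem.Dict.mk d) "N")).isSome = true)
instance (items : List (List (String × List (String × String)))) (labeled : Int) (reviewed : Int) (tp : Int) (tn : Int) (fp : Int) (fn : Int) : Decidable (Pre_count_flags items labeled reviewed tp tn fp fn) := by unfold Pre_count_flags; infer_instance

def pvWitness_count_flags : (List (List (String × List (String × String)))) × Int × Int × Int × Int × Int × Int :=
  ([[("reviewed_flag", [("N", "1")]), ("fp_flag", [("N", "0")]), ("fn_flag", [("N", "1")]), ("tp_flag", [("N", "0")]), ("tn_flag", [("N", "1")])]], 2, 0, 0, 0, 0, 0)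

def Spec_count_flags (items : List (List (String × List (String × String)))) (labeled : Int) (reviewed : Int) (tp : Int) (tn : Int) (fp : Int) (fn : Int) (out : Int × Int × Int × Int × Int × Int) : Prop := out = count_flags_alt items labeled reviewed tp tn fp fn
instance (items : List (List (String × List (String × String)))) (labeled : Int) (reviewed : Int) (tp : Int) (tn : Int) (fp : Int) (fn : Int) (out : Int × Int × Int × Int × Int × Int) : Decidable (Spec_count_flags items labeled reviewed tp tn fp fn out) := by unfold Spec_count_flags; infer_instance

-- ===== CLAIM (what is proved, stated in full; the proofs are below) =====
def Claim_equal_count_flags : Prop := ∀ (items : List (List (String × List (String × String)))) (labeled : Int) (reviewed : Int) (tp : Int) (tn : Int) (fp : Int) (fn : Int), Dom_count_flags items labeled reviewed tp tn fp fn → Pre_count_flags items labeled reviewed tp tn fp fn → Spec_count_flags items labeled reviewed tp tn fp fn (count_flags items labeled reviewed tp tn fp fn)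

-- ===== LEMMAS AND PROOFS =====
theorem pvLoopA_eq (items : List (List (String × List (String × String)))) :
    ∀ (labeled reviewed tp tn fp fn : Int),
      pvLoopA items labeled reviewed tp tn fp fn =
        (labeled,
         reviewed + pvCount items "reviewed_flag",
         tp + pvCount items "tp_flag",
         tn + pvCount items "tn_flag",
         fp + pvCount items "fp_flag",
         fn + pvCount items "fn_flag") := by
  induction items with
  | nil => intro labeled reviewed tp tn fp fn; simp [pvLoopA, pvCount]
  | cons i rest ih =>
      intro labeled reviewed tp tn fp fn
      simp only [pvLoopA, ih, pvCount, List.countP_cons]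
      split_ifs <;> simp only [Prod.mk.injEq, true_and] <;> push_cast <;> omega

theorem count_flags_spec : Claim_equal_count_flags := by
  intro items labeled reviewed tp tn fp fn _ _
  unfold Spec_count_flags count_flags count_flags_alt
  rw [pvLoopA_eq]
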